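-- pv_equiv track=rewrite | github.com/imamhs/Shuddo | shuddo/mining.py | S_find_square_floors_values
-- ===== SOURCE A (Python) =====
-- def S_find_square_floors_values(_data_list):
--     """
--     Returns locations of values which do not change
--     """
--
--     s_data = []
--
--     ds = len(_data_list)
--
--     pd = _data_list[0]
--
--     start = end = -1
--
--     for i in range(1, ds):
--
--         if pd == _data_list[i]:
--             if start == -1:
--                 start = i - 1
--             if start != -1 and i == ds-1:
--                 s_data.append((start, ds-1))
--         else:
--             if start != -1:
--                 end = i - 1
--                 s_data.append((start, end))
--                 start = end = -1
--
--         pd = _data_list[i]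
--
--     return s_data
-- ===== SOURCE B (Python) =====
-- def S_find_square_floors_values(_data_list):
--     """
--     Returns locations of values which do not change
--     (groupby-style: split the list into maximal runs, emit runs of length > 1)
--     """
--     res = []
--     idx = 0
--     rest = _data_list
--     while rest:
--         v = rest[0]
--         k = 1
--         while k < len(rest) and rest[k] == v:
--             k += 1
--         if k > 1:
--             res.append((idx, idx + k - 1))
--         idx += k
--         rest = rest[k:]
--     return res
-- ===== Notes on version B (the rewrite author's own statement) =====
-- stated objective: idiomatic
-- what changed: Replaces A's sentinel-based index scan (start/end markers plus a last-iteration special case) with a groupby-style decomposition that repeatedly splits off the maximal leading run and emits its start and end positions when the run is longer than a single element.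
-- crash fix: On the empty list A raises IndexError (it reads the first element before its loop); B naturally returns an empty result there. — e.g. on S_find_square_floors_values([]): A raises IndexError, B returns []
import Mathlib
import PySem

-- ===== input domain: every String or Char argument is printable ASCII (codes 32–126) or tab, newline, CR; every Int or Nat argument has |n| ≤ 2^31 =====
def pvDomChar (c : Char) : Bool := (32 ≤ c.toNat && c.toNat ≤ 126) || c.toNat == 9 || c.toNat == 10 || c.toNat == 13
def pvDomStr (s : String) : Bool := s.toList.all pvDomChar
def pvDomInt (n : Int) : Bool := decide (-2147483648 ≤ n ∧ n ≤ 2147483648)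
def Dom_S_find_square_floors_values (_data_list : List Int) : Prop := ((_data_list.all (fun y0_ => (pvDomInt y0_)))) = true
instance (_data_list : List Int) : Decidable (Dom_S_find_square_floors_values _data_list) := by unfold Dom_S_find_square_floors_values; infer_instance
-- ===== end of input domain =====

-- B replaces A's sentinel-based index scan by a groupby-style run decomposition (same cost, different shape); return value only.

-- ===== PORT A =====
-- A's loop state: (s_data, pd, start, end); one step of the `for i in range(1, ds)` body.
def pvStepA (ds : Int) (st : List (Int × Int) × Int × Int × Int) (i x : Int) :
    List (Int × Int) × Int × Int × Int :=
  match st with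
  | (sdata, pd, start, e) =>
    if pd = x then
      let start := if start = -1 then i - 1 else start
      let sdata := if start ≠ -1 ∧ i = ds - 1 then sdata ++ [(start, ds - 1)] else sdata
      (sdata, x, start, e)
    else
      if start ≠ -1 then (sdata ++ [(start, i - 1)], x, -1, -1)
      else (sdata, x, start, e)

def S_find_square_floors_values (_data_list : List Int) : List (Int × Int) :=
  let ds : Int := _data_list.length
  let pd : Int := PySem.List.pyGetD _data_list 0 0   -- _data_list[0]; Pre_ excludes [], where Python raises IndexError
  ((PySem.List.pyRange 1 ds 1).foldl
      (fun st i => pvStepA ds st i (PySem.List.pyGetD _data_list i 0))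
      ([], pd, -1, -1)).1

-- ===== PORT B =====
-- inner `while k < len(rest) and rest[k] == v` loop: number of leading elements of the tail equal to v
def pvRunLen (v : Int) : List Int → Nat
  | [] => 0
  | x :: xs => if x = v then pvRunLen v xs + 1 else 0

-- outer `while rest:` loop, peeling one maximal run per iteration (fuel = |rest|, enough since each pass consumes ≥ 1 element)
def pvAltGo : Nat → List Int → Int → List (Int × Int)
  | 0, _, _ => []
  | _ + 1, [], _ => []
  | fuel + 1, v :: rest, idx =>
    let m := pvRunLen v rest
    let k : Int := 1 + (m : Int)
    (if k > 1 then [(idx, idx + k - 1)] else []) ++ pvAltGo fuel (rest.drop m) (idx + k)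

def S_find_square_floors_values_alt (_data_list : List Int) : List (Int × Int) :=
  pvAltGo _data_list.length _data_list 0

-- ===== PRECONDITION & SPEC =====
-- A reads _data_list[0] before its loop, so it raises IndexError on the empty list; Pre_ excludes exactly that.
def Pre_S_find_square_floors_values (_data_list : List Int) : Prop := _data_list ≠ []
instance (_data_list : List Int) : Decidable (Pre_S_find_square_floors_values _data_list) := by unfold Pre_S_find_square_floors_values; infer_instance
def pvWitness_S_find_square_floors_values : List Int := [1, 1, 2]

-- On the empty list A raises IndexError (it reads _data_list[0]); B naturally returns [].
def Raises_S_find_square_floors_values (_data_list : List Int) : Prop := _data_list = []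
instance (_data_list : List Int) : Decidable (Raises_S_find_square_floors_values _data_list) := by unfold Raises_S_find_square_floors_values; infer_instance
def pvRaiseWitness_S_find_square_floors_values : List Int := []
def pvRaiseWitnessOut_S_find_square_floors_values : List (Int × Int) := []

def Spec_S_find_square_floors_values (_data_list : List Int) (out : List (Int × Int)) : Prop := out = S_find_square_floors_values_alt _data_list
instance (_data_list : List Int) (out : List (Int × Int)) : Decidable (Spec_S_find_square_floors_values _data_list out) := by unfold Spec_S_find_square_floors_values; infer_instance

-- ===== CLAIM (what is proved, stated in full; the proofs are below) =====
def Claim_equal_S_find_square_floors_values : Prop := ∀ (_data_list : List Int), Dom_S_find_square_floors_values _data_list → Pre_S_find_square_floors_values _data_list → Spec_S_find_square_floors_values _data_list (S_find_square_floors_values _data_list)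
def Claim_raises_S_find_square_floors_values : Prop := (∀ (_data_list : List Int), Dom_S_find_square_floors_values _data_list → Raises_S_find_square_floors_values _data_list → ¬ Pre_S_find_square_floors_values _data_list) ∧ (Dom_S_find_square_floors_values (pvRaiseWitness_S_find_square_floors_values) ∧ Raises_S_find_square_floors_values (pvRaiseWitness_S_find_square_floors_values) ∧ S_find_square_floors_values_alt (pvRaiseWitness_S_find_square_floors_values) = pvRaiseWitnessOut_S_find_square_floors_values)

-- ===== LEMMAS AND PROOFS =====

lemma pvRunLen_le (v : Int) (l : List Int) : pvRunLen v l ≤ l.length := by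
  induction l with
  | nil => simp [pvRunLen]
  | cons x xs ih => simp only [pvRunLen, List.length_cons]; split <;> omega

-- pvAltGo is insensitive to the fuel as long as it is at least the list length
lemma pvAltGo_fuel : ∀ (f1 f2 : Nat) (l : List Int) (idx : Int),
    l.length ≤ f1 → l.length ≤ f2 → pvAltGo f1 l idx = pvAltGo f2 l idx := by
  intro f1
  induction f1 with
  | zero =>
    intro f2 l idx h1 _
    have hl : l = [] := by cases l with | nil => rfl | cons a b => simp at h1
    subst hl; cases f2 <;> simp [pvAltGo]
  | succ f ih =>
    intro f2 l idx h1 h2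
    cases l with
    | nil => cases f2 <;> simp [pvAltGo]
    | cons v rest =>
      cases f2 with
      | zero => simp at h2
      | succ f2' =>
        simp only [pvAltGo]
        congr 1
        have hm := pvRunLen_le v rest
        exact ih f2' (rest.drop (pvRunLen v rest)) _
          (by simp at h1 ⊢; omega) (by simp at h2 ⊢; omega)

-- the value of A's loop, described over the remaining suffix
def pvRhs : List Int → Int → List (Int × Int) → Int → Int → List (Int × Int)
  | [], _, acc, _, _ => acc
  | x :: xs, s, acc, pd, j0 =>
    let m := pvRunLen pd (x :: xs)
    acc ++ (if s - j0 + (m : Int) > 1 then [(j0, s - 1 + (m : Int))] else [])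
        ++ pvAltGo ((x :: xs).length - m) ((x :: xs).drop m) (s + (m : Int))

lemma pvAltGo_cons (v : Int) (rest : List Int) (idx : Int) :
    pvAltGo (v :: rest).length (v :: rest) idx
      = (if ((pvRunLen v rest : Int)) > 0 then [(idx, idx + (pvRunLen v rest : Int))] else [])
        ++ pvAltGo (rest.length - pvRunLen v rest) (rest.drop (pvRunLen v rest))
            (idx + 1 + (pvRunLen v rest : Int)) := by
  rw [show (v :: rest).length = rest.length + 1 from by simp]
  simp only [pvAltGo]
  rw [pvAltGo_fuel rest.length (rest.length - pvRunLen v rest)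
        (rest.drop (pvRunLen v rest)) (idx + (1 + (pvRunLen v rest : Int)))
        (by simp) (by simp)]
  congr 1
  · split_ifs with h1 h2 h2 <;> first
      | rfl
      | (exfalso; push_cast at h1 h2 ⊢; omega)
      | (congr 2 <;> push_cast <;> omega)
  · congr 1; push_cast; omega

lemma pvMain (rest : List Int) (ds : Int) : ∀ (s : Int) (acc : List (Int × Int)) (pd start j0 : Int),
    ds = s + rest.length →
    1 ≤ s → 0 ≤ j0 → j0 ≤ s - 1 →
    ((start = -1 ∧ j0 = s - 1) ∨ (start = j0 ∧ j0 ≤ s - 2)) →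
    ((PySem.List.enumerate rest s).foldl (fun st p => pvStepA ds st p.1 p.2) (acc, pd, start, -1)).1
      = pvRhs rest s acc pd j0 := by
  induction rest with
  | nil => intro s acc pd start j0 _ _ _ _ _; simp [PySem.List.enumerate_nil, pvRhs]
  | cons x rest' ih =>
    intro s acc pd start j0 hds hs hj00 hj0 hst
    rw [PySem.List.enumerate_cons]
    simp only [List.foldl_cons]
    have hstne : start ≠ -1 ↔ (start = j0 ∧ j0 ≤ s - 2) := by
      constructor
      · intro h; rcases hst with ⟨h1, _⟩ | h1; exact absurd h1 h; exact h1
      · intro ⟨h1, _⟩; omega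
    by_cases hpd : pd = x
    · -- equal branch
      have hstart' : (if start = -1 then s - 1 else start) = j0 := by
        rcases hst with ⟨h1, h2⟩ | ⟨h1, h2⟩ <;> simp [h1] <;> omega
      have hj0ne : j0 ≠ -1 := by omega
      cases rest' with
      | nil =>
        have hL : ds = s + 1 := by simp at hds; omega
        have hstep : pvStepA ds (acc, pd, start, -1) s x = (acc ++ [(j0, ds - 1)], x, j0, -1) := by
          simp only [pvStepA, if_pos hpd, hstart']
          rw [if_pos ⟨hj0ne, by omega⟩]
        rw [hstep]
        simp only [PySem.List.enumerate_nil, List.foldl_nil]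
        have hrl : pvRunLen pd [x] = 1 := by rw [hpd]; simp [pvRunLen]
        simp only [pvRhs, hrl]
        rw [if_pos (by push_cast; omega)]
        simp [pvAltGo]
        all_goals omega
      | cons y ys =>
        have hL : ds = s + (ys.length : Int) + 2 := by simp at hds; omega
        have hstep : pvStepA ds (acc, pd, start, -1) s x = (acc, x, j0, -1) := by
          simp only [pvStepA, if_pos hpd, hstart']
          rw [if_neg (by intro h; omega)]
        rw [hstep]
        rw [ih (s + 1) acc x j0 j0 (by simp; omega) (by omega) hj00 (by omega)
              (Or.inr ⟨rfl, by omega⟩)]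
        -- pvRhs (x :: y :: ys) s acc pd j0 = pvRhs (y :: ys) (s+1) acc x j0
        simp only [pvRhs]
        have hrl : pvRunLen pd (x :: y :: ys) = pvRunLen x (y :: ys) + 1 := by
          rw [hpd]; simp [pvRunLen]
        rw [hrl]
        have hdrop : (x :: y :: ys).drop (pvRunLen x (y :: ys) + 1) = (y :: ys).drop (pvRunLen x (y :: ys)) := by simp
        have hlen : (x :: y :: ys).length - (pvRunLen x (y :: ys) + 1) = (y :: ys).length - pvRunLen x (y :: ys) := by simp
        rw [hdrop, hlen]
        split_ifs <;>
          first
            | rfl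
            | (exfalso; omega)
            | (push_cast; ring_nf)
            | (push_cast; ring_nf; rfl)
    · -- mismatch branch
      have hrl0 : pvRunLen pd (x :: rest') = 0 := by
        unfold pvRunLen; rw [if_neg (fun h : x = pd => hpd h.symm)]
      by_cases hstart : start ≠ -1
      · -- a run is pending: append (start, s-1), reset
        obtain ⟨hsj, hj2⟩ := hstne.mp hstart
        have hstep : pvStepA ds (acc, pd, start, -1) s x = (acc ++ [(start, s - 1)], x, -1, -1) := by
          simp only [pvStepA, if_neg hpd, if_pos hstart]
        rw [hstep]
        rw [ih (s + 1) (acc ++ [(start, s - 1)]) x (-1) s (by simp at hds ⊢; omega)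
              (by omega) (by omega) (by omega) (Or.inl ⟨rfl, by omega⟩)]
        subst hsj
        simp only [pvRhs, hrl0]
        rw [if_pos (by push_cast; omega)]
        simp only [Nat.cast_zero, add_zero, List.drop_zero, Nat.sub_zero]
        rw [pvAltGo_cons x rest' s]
        cases rest' with
        | nil =>
          simp [pvRunLen, pvAltGo, pvRhs]
        | cons y ys =>
          simp only [pvRhs, List.append_assoc]
          split_ifs <;>
            first
              | rfl
              | (exfalso; omega)
              | (push_cast; ring_nf)
              | (push_cast; ring_nf; rfl)
      · -- no pending run
        push_neg at hstart
        have hstep : pvStepA ds (acc, pd, start, -1) s x = (acc, x, -1, -1) := by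
          simp only [pvStepA, if_neg hpd]
          rw [if_neg (by simp [hstart])]
          rw [hstart]
        rw [hstep]
        have hj0s : j0 = s - 1 := by
          rcases hst with ⟨_, h⟩ | ⟨h, _⟩; exact h; omega
        rw [ih (s + 1) acc x (-1) s (by simp at hds ⊢; omega)
              (by omega) (by omega) (by omega) (Or.inl ⟨rfl, by omega⟩)]
        simp only [pvRhs, hrl0]
        rw [if_neg (by push_cast; omega)]
        simp only [Nat.cast_zero, add_zero, List.drop_zero, Nat.sub_zero]
        rw [pvAltGo_cons x rest' s]
        cases rest' with
        | nil =>
          simp [pvRunLen, pvAltGo, pvRhs]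
        | cons y ys =>
          simp only [pvRhs, List.append_assoc, List.nil_append]
          split_ifs <;>
            first
              | rfl
              | (exfalso; omega)
              | (push_cast; ring_nf)
              | (push_cast; ring_nf; rfl)

-- fold over range(1, len) with indexing = fold over enumerate(tail, 1)
lemma pvBridge (v : Int) (rest : List Int)
    (F : (List (Int × Int) × Int × Int × Int) → Int → Int → (List (Int × Int) × Int × Int × Int))
    (init : List (Int × Int) × Int × Int × Int) :
    (PySem.List.pyRange 1 ((v :: rest).length : Int) 1).foldl
        (fun st i => F st i (PySem.List.pyGetD (v :: rest) i 0)) init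
      = (PySem.List.enumerate rest 1).foldl (fun st p => F st p.1 p.2) init := by
  have h0 : (0 : Int) < ((v :: rest).length : Int) := by simp
  have he := PySem.List.enumerate_eq_map_pyRange (v :: rest) 0
  simp only [PySem.List.len_eq] at he
  rw [PySem.List.pyRange_one_cons h0] at he
  rw [PySem.List.enumerate_cons] at he
  simp only [List.map_cons] at he
  have htail : PySem.List.enumerate rest 1
      = (PySem.List.pyRange 1 ((v :: rest).length : Int) 1).map
          (fun j => (j, PySem.List.pyGetD (v :: rest) j 0)) := by
    have := List.tail_eq_of_cons_eq he
    simpa using this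
  rw [htail, List.foldl_map]

-- ===== VERDICT (by name: the statement is the Claim_ definition above) =====
theorem S_find_square_floors_values_spec : Claim_equal_S_find_square_floors_values := by
  intro l _ hpre
  unfold Spec_S_find_square_floors_values
  cases l with
  | nil => exact absurd rfl hpre
  | cons v rest =>
    unfold S_find_square_floors_values
    simp only [PySem.List.pyGetD_zero_cons]
    rw [pvBridge v rest (pvStepA ((v :: rest).length : Int))]
    rw [pvMain rest ((v :: rest).length : Int) 1 [] v (-1) 0 (by simp; omega) (by omega) (by omega)
          (by omega) (Or.inl ⟨rfl, by omega⟩)]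
    unfold S_find_square_floors_values_alt
    cases rest with
    | nil => simp [pvRhs, pvAltGo, pvRunLen]
    | cons y ys =>
      simp only [pvRhs, List.nil_append]
      rw [pvAltGo_cons v (y :: ys) 0]
      split_ifs <;>
        first
          | rfl
          | (exfalso; omega)
          | (push_cast; ring_nf)
          | (push_cast; ring_nf; rfl)

@[simp]
theorem S_find_square_floors_values_raises : Claim_raises_S_find_square_floors_values := by
  unfold Claim_raises_S_find_square_floors_values
  refine ⟨fun l _ h => ?_, by decide⟩
  simp only [Raises_S_find_square_floors_values] at h
  simp [Pre_S_find_square_floors_values, h]
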